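-- pv_equiv track=rewrite | github.com/xindongnov/DEAP | modules/scripts/expression_draw_PCA_plot.py | get_label_color
-- ===== SOURCE A (Python) =====
-- def get_label_color(label):
--     label_color = []
--     n = 1
--     for i,j in enumerate(label):
--         if i == 0:
--             label_color.append(n)
--         else:
--             if label[i] == label[i-1]:
--                 label_color.append(n)
--             else:
--                 n += 1
--                 label_color.append(n)
--     return label_color
-- ===== SOURCE B (Python) =====
-- def get_label_color(label):
--     # pass 1: change-indicator list (1 where a new run starts, 0 otherwise)
--     if not label:
--         return []
--     flags = [1] + [1 if cur != prev else 0 for prev, cur in zip(label, label[1:])]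
--     # pass 2: prefix sums of the indicators give the run numbers
--     out = []
--     total = 0
--     for f in flags:
--         total += f
--         out.append(total)
--     return out
-- ===== Notes on version B (the rewrite author's own statement) =====
-- stated objective: alternative
-- what changed: Replaces A's single stateful scan with label[i]/label[i-1] indexing by two staged passes: first a change-indicator list built from zip(label, label[1:]), then the prefix sums of those indicators, which are exactly the run numbers.
import Mathlib
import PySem

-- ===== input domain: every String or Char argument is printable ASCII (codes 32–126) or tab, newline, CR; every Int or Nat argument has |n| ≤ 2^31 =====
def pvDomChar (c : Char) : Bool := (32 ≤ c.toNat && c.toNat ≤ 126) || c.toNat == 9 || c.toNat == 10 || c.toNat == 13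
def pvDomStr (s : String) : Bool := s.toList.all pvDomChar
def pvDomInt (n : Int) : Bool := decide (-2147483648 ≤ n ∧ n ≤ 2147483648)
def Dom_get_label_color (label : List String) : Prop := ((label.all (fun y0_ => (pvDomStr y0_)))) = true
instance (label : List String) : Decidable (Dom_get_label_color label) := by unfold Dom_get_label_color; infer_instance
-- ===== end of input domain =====

-- B recomputes the run numbers as prefix sums of a change-indicator list; equivalence is about the return value.

-- ===== PORT A =====
-- A's for-loop over enumerate(label), carrying (label_color, n); label[i] / label[i-1] are pyGet?
def get_label_color (label : List String) : List Int :=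
  ((PySem.List.enumerate label 0).foldl
    (fun (st : List Int × Int) (ij : Int × String) =>
      if ij.1 == 0 then (st.1 ++ [st.2], st.2)
      else if PySem.List.pyGet? label ij.1 == PySem.List.pyGet? label (ij.1 - 1) then
        (st.1 ++ [st.2], st.2)
      else (st.1 ++ [st.2 + 1], st.2 + 1))
    ([], 1)).1

-- ===== PORT B =====
-- pass 1 of Source B: [1] + [1 if cur != prev else 0 for prev, cur in zip(label, label[1:])]
def pvFlags (label : List String) : List Int :=
  match label with
  | [] => []
  | _ :: _ => 1 :: (label.zip (label.drop 1)).map (fun p => if p.2 != p.1 then 1 else 0)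

-- pass 2 of Source B: running prefix sum over the flags
def get_label_color_alt (label : List String) : List Int :=
  ((pvFlags label).foldl (fun (st : List Int × Int) f => (st.1 ++ [st.2 + f], st.2 + f)) ([], 0)).1

-- ===== PRECONDITION & SPEC =====
def Spec_get_label_color (label : List String) (out : List Int) : Prop := out = get_label_color_alt label
instance (label : List String) (out : List Int) : Decidable (Spec_get_label_color label out) := by unfold Spec_get_label_color; infer_instance

-- ===== CLAIM (what is proved, stated in full; the proofs are below) =====
def Claim_equal_get_label_color : Prop := ∀ (label : List String), Dom_get_label_color label → Spec_get_label_color label (get_label_color label)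

-- ===== LEMMAS AND PROOFS =====

-- reference recursion: value assigned to each element after the first, given previous element and counter
def pvRef (prev : String) (n : Int) : List String → List Int
  | [] => []
  | x :: xs => if x == prev then n :: pvRef x n xs else (n + 1) :: pvRef x (n + 1) xs

theorem pvRef_cons (prev : String) (n : Int) (x : String) (xs : List String) :
    pvRef prev n (x :: xs) = if x == prev then n :: pvRef x n xs else (n + 1) :: pvRef x (n + 1) xs := rfl

-- A-side: the fold over the suffix starting at s, with prev = label[s-1]
theorem pvFoldA (label : List String) :
    ∀ (t : List String) (s : Nat) (acc : List Int) (n : Int) (prev : String),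
      label.drop s = t → 0 < s → label[s - 1]? = some prev →
      ((PySem.List.enumerate t (s : Int)).foldl
        (fun (st : List Int × Int) (ij : Int × String) =>
          if ij.1 == 0 then (st.1 ++ [st.2], st.2)
          else if PySem.List.pyGet? label ij.1 == PySem.List.pyGet? label (ij.1 - 1) then
            (st.1 ++ [st.2], st.2)
          else (st.1 ++ [st.2 + 1], st.2 + 1))
        (acc, n)).1 = acc ++ pvRef prev n t := by
  intro t
  induction t with
  | nil => intro s acc n prev _ _ _; simp [PySem.List.enumerate_nil, pvRef]
  | cons x rest ih =>
    intro s acc n prev hdrop hs hprev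
    have hslt : s < label.length := by
      by_contra h
      simp [List.drop_eq_nil_of_le (by omega : label.length ≤ s)] at hdrop
    have hxs : label[s]? = some x := by
      have := congrArg (·.head?) hdrop
      simpa [List.head?_drop] using this
    have hrest : label.drop (s + 1) = rest := by
      have := congrArg (·.tail) hdrop
      simpa [List.tail_drop] using this
    rw [PySem.List.enumerate_cons]
    have hget : PySem.List.pyGet? label (s : Int) = some x := by
      simpa [PySem.List.pyGet?_natCast] using hxs
    have hget' : PySem.List.pyGet? label ((s : Int) - 1) = some prev := by
      have : ((s : Int) - 1) = ((s - 1 : Nat) : Int) := by omega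
      rw [this, PySem.List.pyGet?_natCast]; exact hprev
    have hne : ((s : Int) == 0) = false := by
      simp; omega
    simp only [List.foldl_cons, hne, if_neg, Bool.false_eq_true, not_false_eq_true, hget, hget']
    rw [pvRef_cons]
    by_cases hxy : x == prev
    · have : (some x == some prev) = true := by simp_all
      simp only [this, if_pos, hxy]
      have h1 : (s : Int) + 1 = ((s + 1 : Nat) : Int) := by push_cast; ring
      rw [h1, ih (s + 1) (acc ++ [n]) n x hrest (by omega) (by simpa using hxs)]
      simp
    · have : (some x == some prev) = false := by simp_all
      simp only [this, Bool.false_eq_true, if_neg, not_false_eq_true, hxy]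
      have h1 : (s : Int) + 1 = ((s + 1 : Nat) : Int) := by push_cast; ring
      rw [h1, ih (s + 1) (acc ++ [n + 1]) (n + 1) x hrest (by omega) (by simpa using hxs)]
      simp

theorem get_label_color_eq_ref : ∀ (label : List String),
    get_label_color label = match label with | [] => [] | x :: xs => 1 :: pvRef x 1 xs := by
  intro label
  cases label with
  | nil => simp [get_label_color, PySem.List.enumerate_nil]
  | cons x xs =>
    unfold get_label_color
    rw [PySem.List.enumerate_cons]
    simp only [List.foldl_cons, if_pos, beq_self_eq_true, List.nil_append]
    have h1 : (0 : Int) + 1 = ((1 : Nat) : Int) := by norm_num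
    rw [h1, pvFoldA (x :: xs) xs 1 [1] 1 x (by simp) (by omega) (by simp)]
    simp

-- B-side: the prefix-sum fold over the mapped zip equals the reference recursion
theorem pvFoldB : ∀ (xs : List String) (prev : String) (n : Int) (acc : List Int),
    ((((prev :: xs).zip xs).map (fun p => if p.2 != p.1 then (1 : Int) else 0)).foldl
      (fun (st : List Int × Int) f => (st.1 ++ [st.2 + f], st.2 + f)) (acc, n)).1
      = acc ++ pvRef prev n xs := by
  intro xs
  induction xs with
  | nil => intro prev n acc; simp [pvRef]
  | cons x ys ih =>
    intro prev n acc
    rw [pvRef_cons]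
    by_cases hx : x == prev
    · have hbne : (x != prev) = false := by simpa using hx
      simp only [List.zip_cons_cons, List.map_cons, List.foldl_cons, hbne, Bool.false_eq_true,
        if_neg, not_false_eq_true, add_zero]
      rw [ih x n (acc ++ [n])]
      simp [hx]
    · have hbne : (x != prev) = true := by simpa using hx
      simp only [List.zip_cons_cons, List.map_cons, List.foldl_cons, hbne, if_pos]
      rw [ih x (n + 1) (acc ++ [n + 1])]
      simp [hx]

theorem get_label_color_alt_eq_ref : ∀ (label : List String),
    get_label_color_alt label = match label with | [] => [] | x :: xs => 1 :: pvRef x 1 xs := by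
  intro label
  cases label with
  | nil => simp [get_label_color_alt, pvFlags]
  | cons x xs =>
    unfold get_label_color_alt pvFlags
    simp only [List.drop_one, List.tail_cons, List.foldl_cons, List.nil_append, zero_add]
    rw [pvFoldB xs x 1 [1]]
    simp

-- ===== VERDICT (by name: the statement is the Claim_ definition above) =====
theorem get_label_color_spec : Claim_equal_get_label_color := by
  intro label _
  unfold Spec_get_label_color
  rw [get_label_color_eq_ref, get_label_color_alt_eq_ref]
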